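-- pv_equiv track=rewrite | github.com/seo-dong-hyeon/Algorithm | 프로그래머스/연습문제/명예의 전당(1).py | solution
-- ===== SOURCE A (Python) =====
-- import heapq
--
-- def solution(k, score):
--     answer = []
--     heap = []
--
--     for i in range(len(score)):
--         if len(heap) < k:
--             heapq.heappush(heap, score[i])
--         else:
--             if score[i] > heap[0]:
--                 heapq.heappop(heap)
--                 heapq.heappush(heap, score[i])
--         answer.append(heap[0])
--
--     return answer
-- ===== SOURCE B (Python) =====
-- def solution(k, score):
--     # Keep the current top-k scores as a descending list: insert each new
--     # score at its sorted position (searching from the tail), drop the last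
--     # element when the list exceeds k, and report the tail (the day's k-th best).
--     top = []
--     answer = []
--     for s in score:
--         j = len(top)
--         while j > 0 and top[j - 1] < s:
--             j -= 1
--         top.insert(j, s)
--         if len(top) > k:
--             top.pop()
--         answer.append(top[-1])
--     return answer
-- ===== Notes on version B (the rewrite author's own statement) =====
-- stated objective: simpler
-- what changed: Replaces the heap with its conditional pop/push branching by a descending sorted list maintained by unconditional insert-then-trim: each score is inserted at its sorted position (scanning from the tail), the last element is dropped when the list exceeds k, and the answer is the list's last element.
import Mathlib
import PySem

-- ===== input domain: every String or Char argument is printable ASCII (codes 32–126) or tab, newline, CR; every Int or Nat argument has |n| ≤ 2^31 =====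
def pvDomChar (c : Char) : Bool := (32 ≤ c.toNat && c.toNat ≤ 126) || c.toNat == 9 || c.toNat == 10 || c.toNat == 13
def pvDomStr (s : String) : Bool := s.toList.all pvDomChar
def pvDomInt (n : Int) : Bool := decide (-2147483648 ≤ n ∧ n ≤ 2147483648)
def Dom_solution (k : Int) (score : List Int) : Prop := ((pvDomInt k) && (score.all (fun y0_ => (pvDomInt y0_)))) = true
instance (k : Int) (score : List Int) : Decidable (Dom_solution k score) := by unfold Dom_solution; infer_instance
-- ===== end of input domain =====

-- B replaces A's heap (conditional pop/push) by an ascending sorted list maintained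
-- by unconditional insert-then-trim; objective: simpler. Proved equal on Pre_ (k ≥ 1, or empty score).

-- ===== PORT A =====
-- heapq's heap is modeled as a bag whose observed values are exact: heap[0] is the
-- minimum (pvHeapTop), heappush appends, heappop removes one minimal element.
def pvHeapTop (h : List Int) : Int := (PySem.List.min? h (fun y => y)).getD 0

def pvHeapPush (h : List Int) (x : Int) : List Int := h ++ [x]

def pvHeapPop (h : List Int) : List Int := (PySem.List.remove? h (pvHeapTop h)).getD []

def solution (k : Int) (score : List Int) : List Int :=
  ((PySem.List.pyRange 0 (score.length : Int) 1).foldl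
    (fun (st : List Int × List Int) i =>
      let x := PySem.List.pyGetD score i 0
      let heap := st.2
      let heap' :=
        if (heap.length : Int) < k then pvHeapPush heap x
        else if x > pvHeapTop heap then pvHeapPush (pvHeapPop heap) x
        else heap
      (st.1 ++ [pvHeapTop heap'], heap'))
    ([], [])).1

-- ===== PORT B =====
-- Source B's backward while-loop insertion into the descending list: the new score goes
-- after every element ≥ it (scanning from the tail finds the same position).
def insertDesc (s : Int) : List Int → List Int
  | [] => [s]
  | t :: ts => if s ≤ t then t :: insertDesc s ts else s :: t :: ts

def solution_alt (k : Int) (score : List Int) : List Int :=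
  (score.foldl
    (fun (st : List Int × List Int) s =>
      let top := insertDesc s st.2
      let top' := if k < (top.length : Int) then top.dropLast else top
      (st.1 ++ [top'.getLastD 0], top'))
    ([], [])).1

-- ===== PRECONDITION & SPEC =====
-- Pre_ excludes k ≤ 0 with a nonempty score, where A raises IndexError (heap[0] on an empty heap).
def Pre_solution (k : Int) (score : List Int) : Prop := 1 ≤ k ∨ score = []
instance (k : Int) (score : List Int) : Decidable (Pre_solution k score) := by
  unfold Pre_solution; infer_instance

def pvWitness_solution : Int × List Int := (3, [10, 100, 20, 150, 1, 100, 200])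

def Spec_solution (k : Int) (score : List Int) (out : List Int) : Prop := out = solution_alt k score
instance (k : Int) (score : List Int) (out : List Int) : Decidable (Spec_solution k score out) := by
  unfold Spec_solution; infer_instance

-- ===== CLAIM (what is proved, stated in full; the proofs are below) =====
def Claim_equal_solution : Prop := ∀ (k : Int) (score : List Int), Dom_solution k score → Pre_solution k score → Spec_solution k score (solution k score)

-- ===== LEMMAS AND PROOFS =====

theorem insertDesc_perm (s : Int) (l : List Int) : (insertDesc s l).Perm (s :: l) := by
  induction l with
  | nil => simp [insertDesc]
  | cons t ts ih =>
    simp only [insertDesc]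
    split
    · exact ((ih.cons t).trans (List.Perm.swap s t ts))
    · exact List.Perm.refl _

theorem insertDesc_sorted (s : Int) (l : List Int) (h : l.Pairwise (· ≥ ·)) :
    (insertDesc s l).Pairwise (· ≥ ·) := by
  induction l with
  | nil => simp [insertDesc]
  | cons t ts ih =>
    rcases List.pairwise_cons.1 h with ⟨ht, hts⟩
    simp only [insertDesc]
    split
    · rename_i hts'
      refine List.pairwise_cons.2 ⟨?_, ih hts⟩
      intro y hy
      have := (insertDesc_perm s ts).mem_iff.1 hy
      rcases List.mem_cons.1 this with rfl | hmem
      · exact hts'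
      · exact ht y hmem
    · rename_i hts'
      refine List.pairwise_cons.2 ⟨?_, h⟩
      intro y hy
      rcases List.mem_cons.1 hy with rfl | hmem
      · omega
      · exact le_trans (ht y hmem) (by omega)

theorem insertDesc_ne_nil (s : Int) (l : List Int) : insertDesc s l ≠ [] := by
  cases l with
  | nil => simp [insertDesc]
  | cons t ts => simp only [insertDesc]; split <;> simp

theorem insertDesc_length (s : Int) (l : List Int) :
    (insertDesc s l).length = l.length + 1 := by
  simpa using (insertDesc_perm s l).length_eq

theorem insertDesc_append_last (x m : Int) (l : List Int) (h : m < x) :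
    insertDesc x (l ++ [m]) = insertDesc x l ++ [m] := by
  induction l with
  | nil => simp [insertDesc, not_le.2 h]
  | cons t ts ih =>
    simp only [List.cons_append, insertDesc]
    split <;> simp [ih]

theorem insertDesc_of_le (s : Int) (l : List Int) (h : ∀ t ∈ l, s ≤ t) :
    insertDesc s l = l ++ [s] := by
  induction l with
  | nil => rfl
  | cons t ts ih =>
    rw [List.cons_append, insertDesc, if_pos (h t (by simp)),
      ih (fun y hy => h y (by simp [hy]))]

theorem foldl_min_eq (t : List Int) (a m : Int) (hmem : m ∈ a :: t)
    (hle : ∀ y ∈ a :: t, m ≤ y) : t.foldl min a = m := by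
  induction t generalizing a with
  | nil => simp only [List.foldl_nil]; exact (List.mem_singleton.1 hmem).symm
  | cons b ts ih =>
    simp only [List.foldl_cons]
    apply ih
    · have hma : m ≤ a := hle a (by simp)
      have hmb : m ≤ b := hle b (by simp)
      rcases List.mem_cons.1 hmem with rfl | h2
      · have : min m b = m := min_eq_left hmb
        simp [this]
      · rcases List.mem_cons.1 h2 with rfl | h3
        · have : min a m = m := min_eq_right hma
          simp [this]
        · simp [h3]
    · intro y hy
      rcases List.mem_cons.1 hy with rfl | h2
      · exact le_min (hle a (by simp)) (hle b (by simp))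
      · exact hle y (by simp [h2])

-- the observed heap top is the minimum of the bag's contents
theorem heapTop_eq_min (h : List Int) (m : Int) (hmem : m ∈ h)
    (hle : ∀ y ∈ h, m ≤ y) : pvHeapTop h = m := by
  obtain ⟨a, t, rfl⟩ := List.exists_cons_of_ne_nil (List.ne_nil_of_mem hmem)
  rw [pvHeapTop, PySem.List.min?_id_cons, Option.getD_some, foldl_min_eq t a m hmem hle]

-- in a descending sorted list every element is at least the last one
theorem last_le_of_sorted_desc (dl : List Int) (m : Int)
    (hs : (dl ++ [m]).Pairwise (· ≥ ·)) : ∀ y ∈ dl ++ [m], m ≤ y := by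
  intro y hy
  rcases List.mem_append.1 hy with h1 | h1
  · exact (List.pairwise_append.1 hs).2.2 y h1 m (by simp)
  · simp at h1; omega

-- the observed heap top equals the last element of any descending sorted list
-- holding the same elements
theorem heapTop_eq_lastD (h l : List Int) (hp : h.Perm l)
    (hs : l.Pairwise (· ≥ ·)) (hne : l ≠ []) : pvHeapTop h = l.getLastD 0 := by
  rcases List.eq_nil_or_concat l with rfl | ⟨dl, m, rfl⟩
  · exact absurd rfl hne
  · rw [List.concat_eq_append] at hp hs ⊢
    rw [List.getLastD_concat]
    exact heapTop_eq_min h m (hp.mem_iff.2 (by simp))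
      (fun y hy => last_le_of_sorted_desc dl m hs y (hp.mem_iff.1 hy))

-- main loop invariant: with equal accumulated answers, a heap-bag and a descending
-- sorted list holding the same elements, both loops produce the same answer list
theorem main_inv (k : Int) (hk : 1 ≤ k) :
    ∀ (sc heap top ans : List Int), heap.Perm top → top.Pairwise (· ≥ ·) →
    (sc.foldl
      (fun (st : List Int × List Int) x =>
        (st.1 ++ [pvHeapTop (if (st.2.length : Int) < k then pvHeapPush st.2 x
            else if x > pvHeapTop st.2 then pvHeapPush (pvHeapPop st.2) x else st.2)],
          if (st.2.length : Int) < k then pvHeapPush st.2 x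
            else if x > pvHeapTop st.2 then pvHeapPush (pvHeapPop st.2) x else st.2))
      (ans, heap)).1
    =
    (sc.foldl
      (fun (st : List Int × List Int) s =>
        (st.1 ++ [(if k < ((insertDesc s st.2).length : Int) then (insertDesc s st.2).dropLast
            else insertDesc s st.2).getLastD 0],
          if k < ((insertDesc s st.2).length : Int) then (insertDesc s st.2).dropLast
            else insertDesc s st.2))
      (ans, top)).1 := by
  intro sc
  induction sc with
  | nil => intro heap top ans _ _; rfl
  | cons x rest ih =>
    intro heap top ans hp hs
    simp only [List.foldl_cons]
    have hlen : heap.length = top.length := hp.length_eq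
    by_cases hlt : (heap.length : Int) < k
    · -- room in the heap: A pushes, B inserts without trimming
      have hA : (if (heap.length : Int) < k then pvHeapPush heap x
          else if x > pvHeapTop heap then pvHeapPush (pvHeapPop heap) x else heap)
          = heap ++ [x] := by rw [if_pos hlt]; rfl
      have hB : (if k < ((insertDesc x top).length : Int) then (insertDesc x top).dropLast
          else insertDesc x top) = insertDesc x top := by
        rw [if_neg]; rw [insertDesc_length]; omega
      have hp' : (heap ++ [x]).Perm (insertDesc x top) :=
        (List.perm_append_singleton x heap).trans ((hp.cons x).trans (insertDesc_perm x top).symm)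
      have hs' := insertDesc_sorted x top hs
      have htop : pvHeapTop (heap ++ [x]) = (insertDesc x top).getLastD 0 :=
        heapTop_eq_lastD _ _ hp' hs' (insertDesc_ne_nil x top)
      rw [hA, hB, htop]
      exact ih (heap ++ [x]) (insertDesc x top) _ hp' hs'
    · -- heap full: A conditionally replaces the min, B inserts then drops the tail
      have hkle : k ≤ (heap.length : Int) := by omega
      have htne : top ≠ [] := by
        intro hnil; rw [hnil] at hlen; simp [hlen] at hkle; omega
      obtain ⟨dl, m, rfl⟩ : ∃ dl m, top = dl ++ [m] := by
        rcases List.eq_nil_or_concat top with rfl | ⟨dl, m, hl⟩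
        · exact absurd rfl htne
        · exact ⟨dl, m, by simpa using hl⟩
      have hml : ∀ y ∈ dl ++ [m], m ≤ y := last_le_of_sorted_desc dl m hs
      have htopm : pvHeapTop heap = m :=
        heapTop_eq_min heap m (hp.mem_iff.2 (by simp))
          (fun y hy => hml y (hp.mem_iff.1 hy))
      have hB0 : (if k < ((insertDesc x (dl ++ [m])).length : Int)
          then (insertDesc x (dl ++ [m])).dropLast else insertDesc x (dl ++ [m]))
          = (insertDesc x (dl ++ [m])).dropLast := by
        rw [if_pos]; rw [insertDesc_length]; simp at hlen ⊢; omega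
      by_cases hx : pvHeapTop heap < x
      · -- A replaces its minimum by x; B's inserted list sheds its last element m
        have hmx : m < x := htopm ▸ hx
        have hins : (insertDesc x (dl ++ [m])).dropLast = insertDesc x dl := by
          rw [insertDesc_append_last x m dl hmx, List.dropLast_concat]
        have hA : (if (heap.length : Int) < k then pvHeapPush heap x
            else if x > pvHeapTop heap then pvHeapPush (pvHeapPop heap) x else heap)
            = heap.erase m ++ [x] := by
          rw [if_neg hlt, if_pos hx, pvHeapPush, pvHeapPop, htopm,
            PySem.List.remove?_eq_some_erase heap m (hp.mem_iff.2 (by simp)), Option.getD_some]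
        have hpm : heap.Perm (m :: dl) :=
          hp.trans (List.perm_append_singleton m dl)
        have hperase : (heap.erase m).Perm dl := by
          have h1 := hpm.erase m
          rwa [List.erase_cons_head] at h1
        have hp' : (heap.erase m ++ [x]).Perm (insertDesc x dl) :=
          (List.perm_append_singleton x (heap.erase m)).trans
            ((hperase.cons x).trans (insertDesc_perm x dl).symm)
        have hsdl : dl.Pairwise (· ≥ ·) := (List.pairwise_append.1 hs).1
        have hs' := insertDesc_sorted x dl hsdl
        have htop' : pvHeapTop (heap.erase m ++ [x]) = (insertDesc x dl).getLastD 0 :=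
          heapTop_eq_lastD _ _ hp' hs' (insertDesc_ne_nil x dl)
        rw [hA, hB0, hins, htop']
        exact ih _ _ _ hp' hs'
      · -- x no better than the current min: both lists are unchanged up to contents
        have hxm : x ≤ m := by rw [htopm] at hx; omega
        have hA : (if (heap.length : Int) < k then pvHeapPush heap x
            else if x > pvHeapTop heap then pvHeapPush (pvHeapPop heap) x else heap)
            = heap := by rw [if_neg hlt, if_neg hx]
        have hins : (insertDesc x (dl ++ [m])).dropLast = dl ++ [m] := by
          rw [insertDesc_of_le x (dl ++ [m]) (fun t ht => le_trans hxm (hml t ht)),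
            List.dropLast_concat]
        have htop : pvHeapTop heap = (dl ++ [m]).getLastD 0 := by
          rw [List.getLastD_concat]; exact htopm
        rw [hA, hB0, hins, htop]
        exact ih _ _ _ hp hs

-- ===== VERDICT (by name: the statement is the Claim_ definition above) =====
theorem solution_spec : Claim_equal_solution := by
  intro k score _ hpre
  unfold Spec_solution solution solution_alt
  rcases hpre with hk | rfl
  · rw [PySem.List.foldl_pyRange_zero_pyGetD' score 0
      (fun (st : List Int × List Int) x =>
        let heap := st.2
        let heap' :=
          if (heap.length : Int) < k then pvHeapPush heap x
          else if x > pvHeapTop heap then pvHeapPush (pvHeapPop heap) x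
          else heap
        (st.1 ++ [pvHeapTop heap'], heap')) ([], [])]
    exact main_inv k hk score [] [] [] (List.Perm.refl _) (by simp)
  · rfl
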